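-- pv_equiv track=rewrite | github.com/zuevval/source | python/stepic_alg_csc/task4_1_11.py | max_terms
-- ===== SOURCE A (Python) =====
-- from typing import List
--
-- def max_terms(n: int) -> List[int]:
--     term = 1
--     terms = []
--     while n > 2 * term:
--         terms.append(term)
--         n -= term
--         term += 1
--     terms.append(n)
--     return terms
-- ===== SOURCE B (Python) =====
-- from typing import List
--
-- def max_terms(n: int) -> List[int]:
--     if n <= 2:
--         return [n]
--     # integer sqrt of 8n+1 by Newton's method, then read off the cut point k
--     m = 8 * n + 1
--     x = m
--     while True:
--         y = (x + m // x) // 2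
--         if y >= x:
--             break
--         x = y
--     k = (x - 1) // 2
--     return list(range(1, k)) + [k + n - k * (k + 1) // 2]
-- ===== Notes on version B (the rewrite author's own statement) =====
-- stated objective: alternative
-- what changed: B computes the length k of the increasing run in closed form via an integer square root (Newton's method) and emits the list as range(1,k) plus one arithmetic last term, instead of A's repeated-subtraction loop; asymptotically fewer iterations (O(log n) vs O(sqrt n)) but too fast either way for a timing run.
import Mathlib
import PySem

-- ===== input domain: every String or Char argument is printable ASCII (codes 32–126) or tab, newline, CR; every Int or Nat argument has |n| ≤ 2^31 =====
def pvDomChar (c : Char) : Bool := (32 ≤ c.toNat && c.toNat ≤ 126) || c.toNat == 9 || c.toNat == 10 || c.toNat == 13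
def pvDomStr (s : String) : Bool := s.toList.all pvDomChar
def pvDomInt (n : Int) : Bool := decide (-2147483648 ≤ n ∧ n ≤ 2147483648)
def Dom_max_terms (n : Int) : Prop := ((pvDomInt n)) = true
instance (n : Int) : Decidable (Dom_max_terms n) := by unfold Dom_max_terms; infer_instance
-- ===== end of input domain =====

-- B computes the run length in closed form via an integer square root (Newton) instead of A's repeated-subtraction loop; objective: alternative.

-- ===== PORT A =====
-- A's while-loop; the fuel argument is only a totality guard (never exhausted on the inputs A is run on, proved below).
def maxTermsLoop (fuel : Nat) (n term : Int) (terms : List Int) : List Int :=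
  match fuel with
  | 0 => terms ++ [n]
  | fuel + 1 =>
    if 2 * term < n then maxTermsLoop fuel (n - term) (term + 1) (terms ++ [term])
    else terms ++ [n]

def max_terms (n : Int) : List Int :=
  maxTermsLoop (n.toNat + 1) n 1 []

-- ===== PORT B =====
-- B's Newton iteration for the integer square root; fuel is only a totality guard.
def newtonLoop (fuel : Nat) (m x : Int) : Int :=
  match fuel with
  | 0 => x
  | fuel + 1 =>
    let y := PySem.Int.floordiv (x + PySem.Int.floordiv m x) 2
    if y < x then newtonLoop fuel m y else x

def max_terms_alt (n : Int) : List Int :=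
  if n ≤ 2 then [n]
  else
    let m := 8 * n + 1
    let x := newtonLoop (m.toNat + 1) m m
    let k := PySem.Int.floordiv (x - 1) 2
    PySem.List.pyRange 1 k 1 ++ [k + n - PySem.Int.floordiv (k * (k + 1)) 2]

-- ===== PRECONDITION & SPEC =====
def Spec_max_terms (n : Int) (out : List Int) : Prop := out = max_terms_alt n
instance (n : Int) (out : List Int) : Decidable (Spec_max_terms n out) := by unfold Spec_max_terms; infer_instance

-- ===== CLAIM (what is proved, stated in full; the proofs are below) =====
def Claim_equal_max_terms : Prop := ∀ (n : Int), Dom_max_terms n → Spec_max_terms n (max_terms n)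

-- ===== LEMMAS AND PROOFS =====

-- the triangular number t*(t+1)//2
def T (t : Int) : Int := t * (t + 1) / 2

theorem T_two (t : Int) : 2 * T t = t * (t + 1) := by
  obtain ⟨c, hc⟩ := Int.even_mul_succ_self t
  unfold T; omega

theorem T_mono {a b : Int} (ha : 0 ≤ a) (hab : a ≤ b) : T a ≤ T b := by
  nlinarith [T_two a, T_two b]

-- Newton invariant: starting from any over-approximation, the loop returns floor(sqrt m)
theorem newtonLoop_spec : ∀ (fuel : Nat) (m x : Int), 1 ≤ m → 1 ≤ x →
    m < (x + 1) * (x + 1) → x.toNat < fuel →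
    1 ≤ newtonLoop fuel m x ∧
      newtonLoop fuel m x * newtonLoop fuel m x ≤ m ∧
      m < (newtonLoop fuel m x + 1) * (newtonLoop fuel m x + 1) := by
  intro fuel
  induction fuel with
  | zero => intro m x _ _ _ h; omega
  | succ fuel ih =>
    intro m x hm hx hub hfuel
    have hqe : PySem.Int.floordiv m x = m / x := PySem.Int.floordiv_eq_ediv_of_pos (by omega)
    have hye : PySem.Int.floordiv (x + m / x) 2 = (x + m / x) / 2 :=
      PySem.Int.floordiv_eq_ediv_of_pos (by omega)
    have hdm := Int.mul_ediv_add_emod m x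
    have hr0 : 0 ≤ m % x := Int.emod_nonneg m (by omega)
    have hr1 : m % x < x := Int.emod_lt_of_pos m (by omega)
    have hq0 : 0 ≤ m / x := Int.ediv_nonneg (by omega) (by omega)
    have hd2 := Int.mul_ediv_add_emod (x + m / x) 2
    have hs0 : 0 ≤ (x + m / x) % 2 := Int.emod_nonneg _ (by omega)
    have hs1 : (x + m / x) % 2 < 2 := Int.emod_lt_of_pos _ (by omega)
    -- q ≥ 1 when x = 1 (then q = m)
    have hq1 : x = 1 → m / x = m := by intro h; rw [h, Int.ediv_one]
    simp only [newtonLoop, hqe, hye]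
    by_cases hlt : (x + m / x) / 2 < x
    · simp only [hlt, if_true]
      apply ih
      · omega
      · -- 1 ≤ y
        rcases eq_or_lt_of_le hx with h1 | h2
        · have := hq1 h1.symm; omega
        · omega
      · -- m < (y+1)^2
        nlinarith [sq_nonneg (x - m / x - 1), hdm, hd2]
      · omega
    · simp only [hlt, if_false]
      refine ⟨hx, ?_, hub⟩
      -- x ≤ y means q ≥ x, so x*x ≤ q*x ≤ m
      have hqgex : x ≤ m / x := by omega
      nlinarith [hdm]

-- A's loop, entered at state (n = N - T(t-1), term = t, terms = [1..t-1]), computes B's closed form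
theorem loop_spec : ∀ (fuel : Nat) (N t : Int), 1 ≤ t → T t ≤ N → (N - T t).toNat < fuel →
    maxTermsLoop fuel (N - T (t - 1)) t (PySem.List.pyRange 1 t 1) = max_terms_alt N := by
  intro fuel
  induction fuel with
  | zero => intro N t _ _ h; omega
  | succ fuel ih =>
    intro N t ht hTN hfuel
    have hT1 : T (t - 1) = T t - t := by have h1 := T_two (t - 1); have h2 := T_two t; nlinarith
    have hT2 : T (t + 1) = T t + t + 1 := by
      have h1 := T_two (t + 1); have h2 := T_two t; nlinarith
    simp only [maxTermsLoop]
    by_cases hc : 2 * t < N - T (t - 1)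
    · simp only [hc, if_true]
      have hacc : PySem.List.pyRange 1 t 1 ++ [t] = PySem.List.pyRange 1 (t + 1) 1 :=
        (PySem.List.pyRange_one_succ_right (by omega)).symm
      have harg : N - T (t - 1) - t = N - T (t + 1 - 1) := by
        have : (t : Int) + 1 - 1 = t := by ring
        rw [this]; omega
      rw [hacc, harg]
      exact ih N (t + 1) (by omega) (by omega) (by omega)
    · simp only [hc, if_false]
      have hstop : N ≤ T t + t := by omega
      by_cases hN : N ≤ 2
      · have ht1 : t = 1 := by
          by_contra h
          have ht2 : 2 ≤ t := by omega
          have h3 : 3 ≤ T t := by nlinarith [T_two t]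
          omega
        subst ht1
        have hT0 : T (1 - 1) = 0 := by norm_num [T]
        rw [hT0, PySem.List.pyRange_one_eq_nil (by norm_num)]
        simp [max_terms_alt, hN]
      · -- N ≥ 3: identify t with the k that B computes from the square root
        have hN3 : 3 ≤ N := by omega
        have hm1 : (1 : Int) ≤ 8 * N + 1 := by omega
        have hub : 8 * N + 1 < (8 * N + 1 + 1) * (8 * N + 1 + 1) := by nlinarith
        obtain ⟨hr1, hrlo, hrhi⟩ := newtonLoop_spec ((8 * N + 1).toNat + 1) (8 * N + 1)
          (8 * N + 1) hm1 hm1 hub (by omega)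
        set r := newtonLoop ((8 * N + 1).toNat + 1) (8 * N + 1) (8 * N + 1) with hrdef
        have hke : PySem.Int.floordiv (r - 1) 2 = (r - 1) / 2 :=
          PySem.Int.floordiv_eq_ediv_of_pos (by omega)
        set k := (r - 1) / 2 with hkdef
        have hkb : 2 * k ≤ r - 1 ∧ r - 1 < 2 * k + 2 := by omega
        have hr5 : 5 ≤ r := by nlinarith
        have hk2 : 2 ≤ k := by omega
        have hTk : T k ≤ N := by nlinarith [T_two k]
        have hTk1 : N < T (k + 1) := by nlinarith [T_two (k + 1)]
        have hkt : k = t := by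
          rcases lt_trichotomy k t with hlt | heq | hgt
          · exfalso
            have hmono := T_mono (show (0:Int) ≤ k + 1 by omega) (show k + 1 ≤ t by omega)
            omega
          · exact heq
          · exfalso
            have hmono := T_mono (show (0:Int) ≤ t + 1 by omega) (show t + 1 ≤ k by omega)
            omega
        have hfe : PySem.Int.floordiv (k * (k + 1)) 2 = T k := by
          rw [PySem.Int.floordiv_eq_ediv_of_pos (by omega)]; rfl
        have halt : max_terms_alt N = PySem.List.pyRange 1 k 1 ++ [k + N - T k] := by
          simp only [max_terms_alt, if_neg (show ¬ N ≤ 2 from hN)]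
          rw [← hrdef, hke, hfe]
        rw [halt, hkt, show N - T (t - 1) = t + N - T t by omega]

-- ===== VERDICT (by name: the statement is the Claim_ definition above) =====
theorem max_terms_spec : Claim_equal_max_terms := by
  intro n _
  unfold Spec_max_terms max_terms
  by_cases hn : n ≤ 0
  · have h0 : n.toNat = 0 := by omega
    rw [h0]
    simp [maxTermsLoop, max_terms_alt, show ¬ (2 < n) by omega, show n ≤ 2 by omega]
  · have hT1 : T 1 = 1 := by norm_num [T]
    have h := loop_spec (n.toNat + 1) n 1 (by omega) (by omega) (by omega)
    rw [show (1 : Int) - 1 = 0 by ring, show T 0 = 0 by norm_num [T],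
      PySem.List.pyRange_one_eq_nil (by norm_num)] at h
    simpa using h
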